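-- pv_equiv track=rewrite | github.com/tezeladata/algorithmical | Main account/codewars/Python/extra_kata4.py | reverse_alternate
-- ===== SOURCE A (Python) =====
-- def reverse_alternate(st):
--     st = st.split()
--     res_arr = []
--     for i in range(len(st)):
--         if i % 2 != 0:
--             word = st[i][::-1]
--         else:
--             word = st[i]
--         res_arr.append(word)
--     return ' '.join(res_arr)
-- ===== SOURCE B (Python) =====
-- def reverse_alternate(st):
--     def pairs(ws):
--         if len(ws) < 2:
--             return ws[:]
--         return [ws[0], ws[1][::-1]] + pairs(ws[2:])
--     return ' '.join(pairs(st.split()))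
-- ===== Notes on version B (the rewrite author's own statement) =====
-- stated objective: alternative
-- what changed: Replaces the index loop over range(len(words)) with its i%2 parity branch by a direct pairwise recursion that consumes the word list two words at a time, reversing the second of each pair.
import Mathlib
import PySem

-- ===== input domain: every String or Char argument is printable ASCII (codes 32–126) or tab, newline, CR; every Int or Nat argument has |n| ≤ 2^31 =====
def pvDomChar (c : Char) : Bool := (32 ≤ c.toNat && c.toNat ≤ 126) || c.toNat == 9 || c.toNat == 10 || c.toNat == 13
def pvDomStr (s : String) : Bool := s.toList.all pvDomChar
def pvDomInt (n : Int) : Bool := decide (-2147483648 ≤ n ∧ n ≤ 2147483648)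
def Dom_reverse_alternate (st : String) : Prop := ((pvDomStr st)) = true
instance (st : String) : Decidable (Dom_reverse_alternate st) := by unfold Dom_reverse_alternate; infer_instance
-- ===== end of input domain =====

-- B replaces A's index loop with parity test by a pairwise recursion over the word list (alternative decomposition, same cost).


-- ===== PORT A =====
-- st[i][::-1] is ported as Str.slice? … (-1) (step -1 never raises, so .getD "" is never hit);
-- st[i] with i ∈ range(len(st)) is always in range, ported as pyGetD with unused default "".
def reverse_alternate (st : String) : String :=
  let st' := PySem.Str.split₀ st
  let res_arr := (PySem.List.pyRange 0 (st'.length : Int) 1).foldl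
    (fun acc i =>
      let word :=
        if PySem.Int.mod i 2 ≠ 0 then
          (PySem.Str.slice? (PySem.List.pyGetD st' i "") none none (-1)).getD ""
        else
          PySem.List.pyGetD st' i ""
      acc ++ [word]) []
  PySem.Str.join " " res_arr

-- ===== PORT B =====
-- pairs(ws): consume the word list two at a time, reversing the second word of each pair.
def pvPairs : List String → List String
  | [] => []
  | [w] => [w]
  | a :: b :: rest => a :: (PySem.Str.slice? b none none (-1)).getD "" :: pvPairs rest

def reverse_alternate_alt (st : String) : String :=
  PySem.Str.join " " (pvPairs (PySem.Str.split₀ st))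

-- ===== PRECONDITION & SPEC =====
def Spec_reverse_alternate (st : String) (out : String) : Prop := out = reverse_alternate_alt st
instance (st : String) (out : String) : Decidable (Spec_reverse_alternate st out) := by unfold Spec_reverse_alternate; infer_instance

-- ===== CLAIM (what is proved, stated in full; the proofs are below) =====
def Claim_equal_reverse_alternate : Prop := ∀ (st : String), Dom_reverse_alternate st → Spec_reverse_alternate st (reverse_alternate st)

-- ===== LEMMAS AND PROOFS =====

-- A's loop body, mapped over range(k, len(full)) for even k, is pvPairs of the dropped suffix.
lemma pv_loop_eq (full : List String) (k : Nat) (hk : k % 2 = 0) :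
    (PySem.List.pyRange (k : Int) (full.length : Int) 1).map
      (fun i =>
        if PySem.Int.mod i 2 ≠ 0 then
          (PySem.Str.slice? (PySem.List.pyGetD full i "") none none (-1)).getD ""
        else
          PySem.List.pyGetD full i "")
    = pvPairs (full.drop k) := by
  by_cases hge : full.length ≤ k
  · rw [PySem.List.pyRange_one_eq_nil (by exact_mod_cast hge),
        List.drop_eq_nil_of_le hge]
    rfl
  · push Not at hge
    by_cases h1 : full.length = k + 1
    · have hrange : PySem.List.pyRange (k : Int) (full.length : Int) 1 = [(k : Int)] := by
        rw [h1]; push_cast; exact PySem.List.pyRange_one_singleton (k : Int)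
      have hdrop : full.drop k = [full.getD k ""] := by
        rw [List.getD_eq_getElem full "" (by omega : k < full.length),
            List.drop_eq_getElem_cons (by omega : k < full.length)]
        simp [List.drop_eq_nil_of_le, h1]
      rw [hrange, hdrop, List.map_singleton]
      simp [PySem.List.pyGetD_natCast, pvPairs]
      intro h
      exfalso
      omega
    · have hk2 : k + 2 ≤ full.length := by omega
      have hc1 : PySem.List.pyRange (k : Int) (full.length : Int) 1
          = (k : Int) :: PySem.List.pyRange ((k : Int) + 1) (full.length : Int) 1 :=
        PySem.List.pyRange_one_cons (by exact_mod_cast hge)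
      have hc2 : PySem.List.pyRange ((k : Int) + 1) (full.length : Int) 1
          = ((k : Int) + 1) :: PySem.List.pyRange ((k : Int) + 2) (full.length : Int) 1 := by
        have := PySem.List.pyRange_one_cons
          (a := (k : Int) + 1) (b := (full.length : Int)) (by exact_mod_cast (by omega : (k + 1 : Int) < (full.length : Int)))
        simpa [add_assoc] using this
      have hcast : ((k : Int) + 2) = ((k + 2 : Nat) : Int) := by push_cast; ring
      have hrec := pv_loop_eq full (k + 2) (by omega)
      have hdrop : full.drop k = full.getD k "" :: full.getD (k + 1) "" :: full.drop (k + 2) := by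
        rw [List.getD_eq_getElem full "" (by omega : k < full.length),
            List.getD_eq_getElem full "" (by omega : k + 1 < full.length),
            List.drop_eq_getElem_cons (by omega : k < full.length),
            List.drop_eq_getElem_cons (by omega : k + 1 < full.length)]
      rw [hc1, hc2, List.map_cons, List.map_cons, hcast, hrec, hdrop]
      have hg0 : PySem.List.pyGetD full (k : Int) "" = full.getD k "" :=
        PySem.List.pyGetD_natCast full k ""
      have hg1 : PySem.List.pyGetD full ((k : Int) + 1) "" = full.getD (k + 1) "" := by
        have : ((k : Int) + 1) = ((k + 1 : Nat) : Int) := by push_cast; ring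
        rw [this]; exact PySem.List.pyGetD_natCast full (k + 1) ""
      simp [hg0, hg1, pvPairs]
      constructor <;> · intro h; exfalso; omega
termination_by full.length - k

theorem reverse_alternate_spec : Claim_equal_reverse_alternate := by
  intro st _
  unfold Spec_reverse_alternate reverse_alternate reverse_alternate_alt
  simp only
  rw [PySem.List.foldl_append_singleton_eq_map]
  refine congrArg (PySem.Str.join " ") ?_
  simpa using pv_loop_eq (PySem.Str.split₀ st) 0 rfl
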